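-- pv_equiv track=rewrite | github.com/Tylerman90/PythonPractice | authoringAssistant.py | fix_capitalization
-- ===== SOURCE A (Python) =====
-- def fix_capitalization(usr_str):
--     edited_text = ''
--     first_letter = True
--     num_of_cap = 0
--     for char in usr_str:
--         if first_letter and char.islower():
--             edited_text += char.upper()
--             num_of_cap += 1
--             first_letter = False
--         else:
--             first_letter = False
--             edited_text += char
--             if char.isspace():
--                 first_letter = True
--     return (edited_text, num_of_cap)
-- ===== SOURCE B (Python) =====
-- def fix_capitalization(usr_str):
--     # Process maximal runs of whitespace / non-whitespace instead of a per-char flag.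
--     segments = []
--     count = 0
--     i = 0
--     n = len(usr_str)
--     while i < n:
--         j = i
--         if usr_str[i].isspace():
--             while j < n and usr_str[j].isspace():
--                 j += 1
--             segments.append(usr_str[i:j])
--         else:
--             while j < n and not usr_str[j].isspace():
--                 j += 1
--             word = usr_str[i:j]
--             if word[0].islower():
--                 word = word[0].upper() + word[1:]
--                 count += 1
--             segments.append(word)
--         i = j
--     return (''.join(segments), count)
-- ===== Notes on version B (the rewrite author's own statement) =====
-- stated objective: alternative
-- what changed: B groups the string into maximal whitespace/non-whitespace runs and capitalizes the first character of each word-run, instead of A's per-character scan with a first_letter flag.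
import Mathlib
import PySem

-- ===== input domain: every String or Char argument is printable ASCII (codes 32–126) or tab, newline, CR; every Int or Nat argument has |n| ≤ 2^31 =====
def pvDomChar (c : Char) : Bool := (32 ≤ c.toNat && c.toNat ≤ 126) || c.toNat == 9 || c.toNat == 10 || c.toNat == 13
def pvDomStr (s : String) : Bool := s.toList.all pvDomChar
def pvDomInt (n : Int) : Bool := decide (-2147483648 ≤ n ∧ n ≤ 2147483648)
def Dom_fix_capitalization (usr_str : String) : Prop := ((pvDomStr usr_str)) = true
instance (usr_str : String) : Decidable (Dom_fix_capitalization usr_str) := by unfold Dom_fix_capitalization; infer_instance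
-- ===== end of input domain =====

-- B re-implements fix_capitalization by grouping the string into maximal whitespace/non-whitespace runs and capitalizing each word run's head, instead of A's per-character first_letter flag scan (alternative decomposition, same result).


-- ===== PORT A =====
-- A: per-character scan with a first_letter flag; string built by repeated append.
def goA_fix : List Char → List Char → Bool → Int → List Char × Int
  | [], acc, _, cnt => (acc, cnt)
  | c :: rest, acc, first, cnt =>
    if first && PySem.Chars.islower c then
      goA_fix rest (acc ++ [PySem.Chars.upperChar c]) false (cnt + 1)
    else
      goA_fix rest (acc ++ [c]) (PySem.Chars.isspace c) cnt

def fix_capitalization (usr_str : String) : String × Int :=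
  let r := goA_fix usr_str.toList [] true 0
  (String.mk r.1, r.2)

-- ===== PORT B =====
-- B: group into maximal whitespace / non-whitespace runs; capitalize the head of each word run.
def altGo_fix (cs : List Char) : List Char × Int :=
  match cs with
  | [] => ([], 0)
  | c :: rest =>
    if PySem.Chars.isspace c then
      let run := c :: rest.takeWhile (fun x => PySem.Chars.isspace x)
      let r := altGo_fix (rest.dropWhile (fun x => PySem.Chars.isspace x))
      (run ++ r.1, r.2)
    else
      let w := c :: rest.takeWhile (fun x => !PySem.Chars.isspace x)
      let r := altGo_fix (rest.dropWhile (fun x => !PySem.Chars.isspace x))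
      if PySem.Chars.islower c then
        (PySem.Chars.upperChar c :: w.tail ++ r.1, 1 + r.2)
      else
        (w ++ r.1, r.2)
termination_by cs.length
decreasing_by
  · simpa using Nat.lt_succ_of_le (List.length_dropWhile_le _ rest)
  · simpa using Nat.lt_succ_of_le (List.length_dropWhile_le _ rest)

def fix_capitalization_alt (usr_str : String) : String × Int :=
  let r := altGo_fix usr_str.toList
  (String.mk r.1, r.2)

-- ===== PRECONDITION & SPEC =====
def Spec_fix_capitalization (usr_str : String) (out : String × Int) : Prop := out = fix_capitalization_alt usr_str
instance (usr_str : String) (out : String × Int) : Decidable (Spec_fix_capitalization usr_str out) := by unfold Spec_fix_capitalization; infer_instance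

-- ===== CLAIM (what is proved, stated in full; the proofs are below) =====
def Claim_equal_fix_capitalization : Prop := ∀ (usr_str : String), Dom_fix_capitalization usr_str → Spec_fix_capitalization usr_str (fix_capitalization usr_str)

-- ===== LEMMAS AND PROOFS =====
theorem islower_of_isspace_fix (c : Char) (h : PySem.Chars.isspace c = true) :
    PySem.Chars.islower c = false := by
  by_contra hne
  have hl : PySem.Chars.islower c = true := by
    cases hb : PySem.Chars.islower c <;> simp_all
  unfold PySem.Chars.islower at hl
  unfold PySem.Chars.isspace at h
  simp only [Bool.and_eq_true, decide_eq_true_eq, Char.le_def] at hl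
  simp only [Bool.or_eq_true, Bool.and_eq_true, decide_eq_true_eq] at h
  obtain ⟨h1, h2⟩ := hl
  have h1' : (97 : Nat) ≤ c.val.toNat := UInt32.le_iff_toNat_le.mp h1
  have h2' : c.val.toNat ≤ 122 := UInt32.le_iff_toNat_le.mp h2
  have hcn : c.toNat = c.val.toNat := rfl
  rw [hcn] at h
  omega

-- In the true-flag state, a run of whitespace characters is copied verbatim and the flag stays true.
theorem goA_fix_spaces (sp : List Char) (h : ∀ x ∈ sp, PySem.Chars.isspace x = true) :
    ∀ (rest acc : List Char) (cnt : Int),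
      goA_fix (sp ++ rest) acc true cnt = goA_fix rest (acc ++ sp) true cnt := by
  induction sp with
  | nil => intro rest acc cnt; simp
  | cons c sp' ih =>
    intro rest acc cnt
    have hc : PySem.Chars.isspace c = true := h c (by simp)
    have hl : PySem.Chars.islower c = false := islower_of_isspace_fix c hc
    simp only [List.cons_append, goA_fix, hl, Bool.and_false, Bool.false_eq_true, if_false, hc]
    rw [ih (fun x hx => h x (by simp [hx]))]
    simp

-- In the false-flag state the word tail is copied verbatim, and the scan continues in the
-- true-flag state from the first whitespace character onward.
theorem goA_fix_false (rest : List Char) :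
    ∀ (acc : List Char) (cnt : Int),
      goA_fix rest acc false cnt =
        goA_fix (rest.dropWhile (fun x => !PySem.Chars.isspace x))
          (acc ++ rest.takeWhile (fun x => !PySem.Chars.isspace x)) true cnt := by
  induction rest with
  | nil => intro acc cnt; simp [goA_fix]
  | cons c t ih =>
    intro acc cnt
    by_cases hc : PySem.Chars.isspace c = true
    · have hl : PySem.Chars.islower c = false := islower_of_isspace_fix c hc
      simp only [List.takeWhile_cons, List.dropWhile_cons, hc, Bool.not_true, if_false,
        Bool.false_eq_true, goA_fix, hl, Bool.and_false, List.append_nil]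
    · have hc' : PySem.Chars.isspace c = false := by
        cases hcb : PySem.Chars.isspace c <;> simp_all
      simp only [List.takeWhile_cons, List.dropWhile_cons, hc', Bool.not_false, if_true,
        goA_fix, Bool.false_and, Bool.false_eq_true, if_false]
      rw [ih]
      simp

theorem goA_fix_eq_altGo (cs : List Char) :
    ∀ (acc : List Char) (cnt : Int),
      goA_fix cs acc true cnt = (acc ++ (altGo_fix cs).1, cnt + (altGo_fix cs).2) := by
  match cs with
  | [] => intro acc cnt; simp [goA_fix, altGo_fix]
  | c :: rest =>
    intro acc cnt
    by_cases hc : PySem.Chars.isspace c = true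
    · -- whitespace run
      have hrun : ∀ x ∈ c :: rest.takeWhile (fun x => PySem.Chars.isspace x),
          PySem.Chars.isspace x = true := by
        intro x hx
        rcases List.mem_cons.mp hx with h | h
        · simpa [h] using hc
        · exact List.mem_takeWhile_imp h
      have hsplit : c :: rest =
          (c :: rest.takeWhile (fun x => PySem.Chars.isspace x)) ++
            rest.dropWhile (fun x => PySem.Chars.isspace x) := by
        simp [List.takeWhile_append_dropWhile]
      have ih := goA_fix_eq_altGo (rest.dropWhile (fun x => PySem.Chars.isspace x))
      conv_lhs => rw [hsplit]
      rw [goA_fix_spaces _ hrun, ih]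
      simp only [altGo_fix, hc, if_true]
      simp
    · -- word run
      have hc' : PySem.Chars.isspace c = false := by
        cases hcb : PySem.Chars.isspace c <;> simp_all
      have ih := goA_fix_eq_altGo (rest.dropWhile (fun x => !PySem.Chars.isspace x))
      by_cases hl : PySem.Chars.islower c = true
      · simp only [goA_fix, hl, Bool.and_self, if_true, hc']
        rw [goA_fix_false, ih]
        simp only [altGo_fix, hc', Bool.false_eq_true, if_false, hl, if_true,
          List.tail_cons, Prod.mk.injEq]
        refine ⟨by simp, by omega⟩
      · have hl' : PySem.Chars.islower c = false := by
          cases hb : PySem.Chars.islower c <;> simp_all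
        simp only [goA_fix, hl', Bool.and_false, Bool.false_eq_true, if_false, hc']
        rw [goA_fix_false, ih]
        simp only [altGo_fix, hc', Bool.false_eq_true, if_false, hl']
        simp
termination_by cs.length
decreasing_by
  · simpa using Nat.lt_succ_of_le (List.length_dropWhile_le _ rest)
  · simpa using Nat.lt_succ_of_le (List.length_dropWhile_le _ rest)

-- ===== VERDICT (by name: the statement is the Claim_ definition above) =====
theorem fix_capitalization_spec : Claim_equal_fix_capitalization := by
  intro s _
  unfold Spec_fix_capitalization fix_capitalization fix_capitalization_alt
  rw [goA_fix_eq_altGo]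
  simp
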